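-- pv_equiv track=rewrite | github.com/Illya-Maznitskiy/job-notifier | notifier/telegram/job_utils.py | truncate_title
-- ===== SOURCE A (Python) =====
-- def truncate_title(title: str, max_length: int = 34) -> str:
--     """Truncate title without cutting words."""
--     words = title.split()
--     truncated = ""
--     for word in words:
--         if len(truncated + " " + word if truncated else word) > max_length:
--             break
--         truncated += (" " if truncated else "") + word
--     return truncated or title[:max_length]
-- ===== SOURCE B (Python) =====
-- def truncate_title(title: str, max_length: int = 34) -> str:
--     """Truncate title without cutting words (prefix-length table + count)."""
--     words = title.split()
--     prefix = []
--     total = -1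
--     for w in words:
--         total += 1 + len(w)
--         prefix.append(total)
--     # prefix[i] == len(" ".join(words[:i+1])); strictly increasing,
--     # so the number of entries <= max_length is the greedy cut point.
--     k = sum(1 for p in prefix if p <= max_length)
--     return " ".join(words[:k]) if k else title[:max_length]
-- ===== Notes on version B (the rewrite author's own statement) =====
-- stated objective: alternative
-- what changed: Replaces A's string-accumulating loop with an early break by building an explicit prefix-length table (length of joining the first k words), counting the entries that fit within max_length, and joining that many words in one step.
import Mathlib
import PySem

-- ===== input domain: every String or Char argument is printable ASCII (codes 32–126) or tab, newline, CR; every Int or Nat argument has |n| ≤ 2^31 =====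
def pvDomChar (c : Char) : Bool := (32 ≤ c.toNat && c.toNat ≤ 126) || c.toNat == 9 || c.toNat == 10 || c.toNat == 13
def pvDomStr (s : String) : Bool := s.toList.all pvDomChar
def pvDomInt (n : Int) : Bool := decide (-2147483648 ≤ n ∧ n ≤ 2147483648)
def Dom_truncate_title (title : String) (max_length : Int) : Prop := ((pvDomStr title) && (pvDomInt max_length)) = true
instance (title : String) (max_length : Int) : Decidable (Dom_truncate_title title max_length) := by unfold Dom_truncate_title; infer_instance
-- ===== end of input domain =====

-- B replaces A's accumulate-and-break string loop by an explicit prefix-length table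
-- (length of joining the first k words), counting the fitting entries, and one join.


-- ===== PORT A =====
-- A's for-loop: 'if len(truncated + " " + word if truncated else word) > max_length: break;
--               truncated += (" " if truncated else "") + word'
def truncA (max_length : Int) : List (List Char) → List Char → List Char
  | [], truncated => truncated
  | word :: words, truncated =>
    if ((if truncated.isEmpty then word else truncated ++ [' '] ++ word).length : Int) > max_length then
      truncated
    else
      truncA max_length words (truncated ++ (if truncated.isEmpty then [] else [' ']) ++ word)

def truncate_title (title : String) (max_length : Int) : String :=
  let words := PySem.Chars.split₀ title.toList
  let truncated := truncA max_length words []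
  -- 'return truncated or title[:max_length]'
  if truncated.isEmpty then String.ofList (PySem.Chars.slice title.toList none (some max_length))
  else String.ofList truncated

-- ===== PORT B =====
-- B's table loop: 'total += 1 + len(w); prefix.append(total)' starting from total = -1
def prefixTable : List (List Char) → Int → List Int
  | [], _ => []
  | w :: ws, total => (total + 1 + (w.length : Int)) :: prefixTable ws (total + 1 + (w.length : Int))

def truncate_title_alt (title : String) (max_length : Int) : String :=
  let words := PySem.Chars.split₀ title.toList
  let pfx := prefixTable words (-1)
  -- 'k = sum(1 for p in prefix if p <= max_length)'
  let k := (pfx.filter (fun p => decide (p ≤ max_length))).length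
  if k ≠ 0 then String.ofList (PySem.Chars.join [' '] (words.take k))
  else String.ofList (PySem.Chars.slice title.toList none (some max_length))

-- ===== PRECONDITION & SPEC =====
def Spec_truncate_title (title : String) (max_length : Int) (out : String) : Prop := out = truncate_title_alt title max_length
instance (title : String) (max_length : Int) (out : String) : Decidable (Spec_truncate_title title max_length out) := by unfold Spec_truncate_title; infer_instance

-- ===== CLAIM (what is proved, stated in full; the proofs are below) =====
def Claim_equal_truncate_title : Prop := ∀ (title : String) (max_length : Int), Dom_truncate_title title max_length → Spec_truncate_title title max_length (truncate_title title max_length)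

-- ===== LEMMAS AND PROOFS =====

-- greedy word count with remaining budget b (first word of the continuation costs len w + 1)
def cnt (b : Int) : List (List Char) → Nat
  | [] => 0
  | w :: ws => if ((w.length : Int) + 1) > b then 0 else 1 + cnt (b - 1 - (w.length : Int)) ws

lemma cnt_nonpos {b : Int} (hb : b ≤ 0) (ws : List (List Char)) : cnt b ws = 0 := by
  cases ws with
  | nil => rfl
  | cons w ws =>
    have : ((w.length : Int) + 1) > b := by omega
    simp [cnt, this]

lemma filter_prefixTable (m : Int) :
    ∀ (ws : List (List Char)) (total : Int),
      ((prefixTable ws total).filter (fun p => decide (p ≤ m))).length = cnt (m - total) ws := by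
  intro ws
  induction ws with
  | nil => intro total; simp [prefixTable, cnt]
  | cons w ws ih =>
    intro total
    by_cases h : ((w.length : Int) + 1) > m - total
    · have hhead : ¬ (total + 1 + (w.length : Int) ≤ m) := by omega
      have h0 : cnt (m - (total + 1 + (w.length : Int))) ws = 0 :=
        cnt_nonpos (by omega) ws
      simp [prefixTable, cnt, h, hhead, ih, h0]
    · have hhead : total + 1 + (w.length : Int) ≤ m := by omega
      have harg : m - (total + 1 + (w.length : Int)) = m - total - 1 - (w.length : Int) := by ring
      simp [prefixTable, cnt, h, hhead, ih, harg]
      omega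

lemma truncA_acc (m : Int) :
    ∀ (ws : List (List Char)) (acc : List Char), acc ≠ [] →
      truncA m ws acc
        = acc ++ (ws.take (cnt (m - (acc.length : Int)) ws)).flatMap (fun w => ' ' :: w) := by
  intro ws
  induction ws with
  | nil => intro acc _; simp [truncA, cnt]
  | cons w ws ih =>
    intro acc hacc
    have hne : acc.isEmpty = false := by simpa [List.isEmpty_iff] using hacc
    by_cases h : ((w.length : Int) + 1) > m - (acc.length : Int)
    · have hcond : ((if acc.isEmpty then w else acc ++ [' '] ++ w).length : Int) > m := by
        simp only [hne, Bool.false_eq_true, if_false, List.length_append, List.length_cons,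
          List.length_nil]
        push_cast; omega
      rw [truncA, if_pos hcond]
      simp [cnt, h]
    · have hsmall : ¬ (((acc ++ [' '] ++ w).length : Int)) > m := by
        simp only [List.length_append, List.length_cons, List.length_nil]
        push_cast; omega
      have hacc' : acc ++ [' '] ++ w ≠ [] := by simp
      have hlen : ((acc ++ [' '] ++ w).length : Int) = (acc.length : Int) + 1 + (w.length : Int) := by
        simp only [List.length_append, List.length_cons, List.length_nil]; push_cast; ring
      rw [truncA, if_neg (by simpa [hne] using hsmall)]
      have := ih (acc ++ [' '] ++ w) hacc'
      rw [show acc ++ (if acc.isEmpty then [] else [' ']) ++ w = acc ++ [' '] ++ w by simp [hne]]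
      rw [this, hlen]
      have harg : m - ((acc.length : Int) + 1 + (w.length : Int))
          = m - (acc.length : Int) - 1 - (w.length : Int) := by ring
      rw [harg]
      rw [show cnt (m - (acc.length : Int)) (w :: ws)
            = 1 + cnt (m - (acc.length : Int) - 1 - (w.length : Int)) ws by
          simp [cnt, h]]
      rw [show 1 + cnt (m - (acc.length : Int) - 1 - (w.length : Int)) ws
            = (cnt (m - (acc.length : Int) - 1 - (w.length : Int)) ws) + 1 by omega]
      simp [List.take_succ_cons, List.flatMap_cons]

lemma join_space_cons (w : List Char) (l : List (List Char)) :
    PySem.Chars.join [' '] (w :: l) = w ++ l.flatMap (fun x => ' ' :: x) := by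
  induction l generalizing w with
  | nil => simp [PySem.Chars.join_singleton]
  | cons x l ih =>
    rw [PySem.Chars.join_cons_cons, ih x]
    simp [List.flatMap_cons]

lemma split₀go_ne_nil :
    ∀ (s cur : List Char) (acc : List (List Char)),
      (∀ w ∈ acc, w ≠ []) →
      ∀ w ∈ PySem.Chars.split₀.go s cur acc, w ≠ [] := by
  intro s
  induction s with
  | nil =>
    intro cur acc hacc w hw
    by_cases hc : cur.isEmpty
    · simp only [PySem.Chars.split₀.go, hc, if_true, List.mem_reverse] at hw
      exact hacc w hw
    · simp only [PySem.Chars.split₀.go, hc] at hw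
      rcases List.mem_cons.mp (List.mem_reverse.mp hw) with h | h
      · subst h
        intro h'
        exact hc (List.isEmpty_iff.mpr (List.reverse_eq_nil_iff.mp h'))
      · exact hacc w h
  | cons c rest ih =>
    intro cur acc hacc w hw
    by_cases hsp : PySem.Chars.isspace c
    · by_cases hc : cur.isEmpty
      · simp only [PySem.Chars.split₀.go, hsp, hc, if_true] at hw
        exact ih [] acc hacc w hw
      · simp only [PySem.Chars.split₀.go, hsp, hc, if_true] at hw
        refine ih [] (cur.reverse :: acc) ?_ w hw
        intro v hv
        rcases List.mem_cons.mp hv with h | h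
        · subst h
          intro h'
          exact hc (List.isEmpty_iff.mpr (List.reverse_eq_nil_iff.mp h'))
        · exact hacc v h
    · simp only [PySem.Chars.split₀.go, hsp] at hw
      exact ih (c :: cur) acc hacc w hw

lemma split₀_ne_nil {s w : List Char} (h : w ∈ PySem.Chars.split₀ s) : w ≠ [] :=
  split₀go_ne_nil s [] [] (by simp) w h

-- ===== VERDICT (by name: the statement is the Claim_ definition above) =====
theorem truncate_title_spec : Claim_equal_truncate_title := by
  intro title m _
  unfold Spec_truncate_title truncate_title truncate_title_alt
  cases hw : PySem.Chars.split₀ title.toList with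
  | nil => simp [truncA, prefixTable]
  | cons w ws =>
    have hwne : w ≠ [] := split₀_ne_nil (by rw [hw]; exact List.mem_cons_self)
    have hk : ((prefixTable (w :: ws) (-1)).filter (fun p => decide (p ≤ m))).length
        = cnt (m + 1) (w :: ws) := by
      simpa using filter_prefixTable m (w :: ws) (-1)
    by_cases hbig : ((w.length : Int)) > m
    · -- first word does not fit: A keeps "", B counts 0; both slice
      have hA : truncA m (w :: ws) [] = [] := by
        simp [truncA, hbig]
      have hc0 : cnt (m + 1) (w :: ws) = 0 := by
        simp [cnt, show ((w.length : Int) + 1) > m + 1 by omega]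
      simp [hA, hk, hc0]
    · -- first word fits
      have hA : truncA m (w :: ws) []
          = w ++ (ws.take (cnt (m - (w.length : Int)) ws)).flatMap (fun x => ' ' :: x) := by
        rw [truncA, if_neg (by simpa using hbig)]
        simpa using truncA_acc m ws w hwne
      have hc : cnt (m + 1) (w :: ws) = 1 + cnt (m - (w.length : Int)) ws := by
        rw [cnt, if_neg (by omega)]
        congr 1
        congr 1
        ring
      have hAne : truncA m (w :: ws) [] ≠ [] := by
        rw [hA]; simp [hwne]
      rw [if_neg (by simpa [List.isEmpty_iff] using hAne)]
      simp only [hk, hc]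
      rw [if_pos (by omega)]
      rw [show 1 + cnt (m - (w.length : Int)) ws = (cnt (m - (w.length : Int)) ws) + 1 by omega]
      rw [List.take_succ_cons, join_space_cons, hA]
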